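-- pv_equiv track=rewrite | github.com/Stage-11-Agentics/lattice | scripts/lattice_art.py | make_dense_diamond
-- ===== SOURCE A (Python) =====
-- def make_dense_diamond(cols: int = 40, rows: int = 24) -> list[list[int]]:
--     """Dense diamond lattice with smaller spacing — looks great as braille."""
--     grid = [[0] * cols for _ in range(rows)]
--     spacing = 4
--
--     for y in range(rows):
--         for x in range(cols):
--             if (x + y) % spacing == 0 or (x - y) % spacing == 0:
--                 grid[y][x] = 1
--     return grid
-- ===== SOURCE B (Python) =====
-- def make_dense_diamond(cols: int = 40, rows: int = 24) -> list[list[int]]: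
--     """Dense diamond lattice with smaller spacing — looks great as braille.
--
--     Tile-based: the cell value only depends on (x, y % 4), so build the (at
--     most 4, never more than rows) template rows once and stamp a copy of the
--     right template for each row, instead of testing every cell of the grid."""
--     templates = [
--         [1 if (x + r) % 4 == 0 or (x - r) % 4 == 0 else 0 for x in range(cols)]
--         for r in range(min(rows, 4))
--     ]
--     return [list(templates[y % 4]) for y in range(rows)]
-- ===== Notes on version B (the rewrite author's own statement) =====
-- stated objective: faster
-- what changed: B exploits the period-4 vertical symmetry: it computes only 4 template rows and stamps copies, instead of A's per-cell test over the whole rows x cols grid.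
import Mathlib
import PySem

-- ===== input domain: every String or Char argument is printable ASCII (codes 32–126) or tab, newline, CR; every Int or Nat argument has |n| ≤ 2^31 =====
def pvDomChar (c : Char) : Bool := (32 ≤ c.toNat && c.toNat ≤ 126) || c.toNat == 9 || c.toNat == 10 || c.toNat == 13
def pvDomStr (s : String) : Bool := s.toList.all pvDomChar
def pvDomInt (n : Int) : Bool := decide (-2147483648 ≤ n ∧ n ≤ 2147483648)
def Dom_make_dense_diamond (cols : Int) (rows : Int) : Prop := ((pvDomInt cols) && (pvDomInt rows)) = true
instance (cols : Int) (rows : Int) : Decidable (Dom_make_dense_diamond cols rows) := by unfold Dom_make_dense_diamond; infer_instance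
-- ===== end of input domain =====

-- B builds only the 4 template rows (the pattern has vertical period 4) and stamps copies,
-- instead of A's per-cell modulo test over the whole grid; measurably faster in Python.

-- ===== PORT A =====
def make_dense_diamond (cols : Int) (rows : Int) : List (List Int) :=
  -- grid = [[0] * cols for _ in range(rows)]  ([0]*cols = replicate with negative clamped to 0, as in Python)
  let grid := (PySem.List.pyRange 0 rows 1).map (fun _ => List.replicate cols.toNat (0 : Int))
  -- for y in range(rows): for x in range(cols): if …: grid[y][x] = 1
  -- y, x come from range(rows)/range(cols) so are ≥ 0 and in range: .toNat indexing is exact here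
  (PySem.List.pyRange 0 rows 1).foldl (fun g y =>
    (PySem.List.pyRange 0 cols 1).foldl (fun g x =>
      if PySem.Int.mod (x + y) 4 = 0 ∨ PySem.Int.mod (x - y) 4 = 0 then
        g.modify y.toNat (fun row => row.set x.toNat 1)
      else g) g) grid

-- ===== PORT B =====
def make_dense_diamond_alt (cols : Int) (rows : Int) : List (List Int) :=
  -- templates = [[1 if (x+r)%4==0 or (x-r)%4==0 else 0 for x in range(cols)] for r in range(min(rows, 4))]
  let templates := (PySem.List.pyRange 0 (min rows 4) 1).map (fun r =>
    (PySem.List.pyRange 0 cols 1).map (fun x =>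
      if PySem.Int.mod (x + r) 4 = 0 ∨ PySem.Int.mod (x - r) 4 = 0 then (1 : Int) else 0))
  -- [list(templates[y % 4]) for y in range(rows)]  (list(...) copies; identity on immutable Lean lists)
  (PySem.List.pyRange 0 rows 1).map (fun y =>
    PySem.List.pyGetD templates (PySem.Int.mod y 4) [])

-- ===== PRECONDITION & SPEC =====
def Spec_make_dense_diamond (cols : Int) (rows : Int) (out : List (List Int)) : Prop := out = make_dense_diamond_alt cols rows
instance (cols : Int) (rows : Int) (out : List (List Int)) : Decidable (Spec_make_dense_diamond cols rows out) := by unfold Spec_make_dense_diamond; infer_instance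

-- ===== CLAIM (what is proved, stated in full; the proofs are below) =====
def Claim_equal_make_dense_diamond : Prop := ∀ (cols : Int) (rows : Int), Dom_make_dense_diamond cols rows → Spec_make_dense_diamond cols rows (make_dense_diamond cols rows)

-- ===== LEMMAS AND PROOFS =====

-- the cell condition, as a predicate on (y, x)
abbrev pvCond (y x : Int) : Prop :=
  PySem.Int.mod (x + y) 4 = 0 ∨ PySem.Int.mod (x - y) 4 = 0

lemma pvCond_mod (y x : Int) : pvCond (PySem.Int.mod y 4) x ↔ pvCond y x := by
  unfold pvCond
  rw [PySem.Int.mod_eq_emod_of_pos (a := y) (by norm_num),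
      PySem.Int.mod_eq_emod_of_pos (a := x + y % 4) (by norm_num),
      PySem.Int.mod_eq_emod_of_pos (a := x - y % 4) (by norm_num),
      PySem.Int.mod_eq_emod_of_pos (a := x + y) (by norm_num),
      PySem.Int.mod_eq_emod_of_pos (a := x - y) (by norm_num)]
  omega

lemma modify_modify_same {α : Type} (l : List α) (n : Nat) (f g : α → α) :
    (l.modify n f).modify n g = l.modify n (fun x => g (f x)) := by
  apply List.ext_getElem (by simp)
  intro j h1 h2
  rw [List.getElem_modify, List.getElem_modify, List.getElem_modify]
  split <;> rfl

-- a fold of guarded modifies at one fixed index is a single modify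
lemma foldl_modify_factor {α : Type} (xs : List α) (c : α → Prop) [DecidablePred c]
    (n : Nat) (h : α → List Int → List Int) (g : List (List Int)) :
    xs.foldl (fun g x => if c x then g.modify n (h x) else g) g
      = g.modify n (fun r => xs.foldl (fun r x => if c x then h x r else r) r) := by
  induction xs generalizing g with
  | nil => exact (List.modify_id n g).symm
  | cons a as ih =>
    simp only [List.foldl_cons]
    by_cases hc : c a
    · simp only [if_pos hc, ih, modify_modify_same]
    · simp only [if_neg hc, ih]

lemma set_fold_length (c : Nat → Prop) [DecidablePred c] (l : List Nat) (row : List Int) :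
    (l.foldl (fun r k => if c k then r.set k 1 else r) row).length = row.length := by
  induction l generalizing row with
  | nil => rfl
  | cons a as ih =>
    simp only [List.foldl_cons]
    by_cases hc : c a
    · rw [if_pos hc, ih, List.length_set]
    · rw [if_neg hc, ih]

lemma set_fold_getElem (c : Nat → Prop) [DecidablePred c] (n : Nat) (row : List Int)
    (j : Nat) (hj : j < row.length) :
    ((List.range n).foldl (fun r k => if c k then r.set k 1 else r) row)[j]'(by
        rw [set_fold_length]; exact hj)
      = if j < n ∧ c j then 1 else row[j] := by
  induction n with
  | zero => simp
  | succ n ih =>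
    simp only [List.range_succ, List.foldl_append, List.foldl_cons, List.foldl_nil]
    by_cases hc : c n
    · simp only [hc, if_true]
      rw [List.getElem_set]
      by_cases hjn : n = j
      · subst hjn
        rw [if_pos rfl, if_pos ⟨Nat.lt_succ_self n, hc⟩]
      · rw [if_neg hjn, ih]
        by_cases hcj : c j
        · by_cases hlt : j < n
          · rw [if_pos ⟨hlt, hcj⟩, if_pos ⟨Nat.lt_succ_of_lt hlt, hcj⟩]
          · rw [if_neg (by tauto), if_neg (by omega)]
        · rw [if_neg (by tauto), if_neg (by tauto)]
    · simp only [hc, if_false]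
      rw [ih]
      by_cases hcj : c j
      · by_cases hlt : j < n
        · rw [if_pos ⟨hlt, hcj⟩, if_pos ⟨Nat.lt_succ_of_lt hlt, hcj⟩]
        · have hnot : ¬(j < n + 1 ∧ c j) := by
            rintro ⟨h1, -⟩
            exact hc ((show j = n by omega) ▸ hcj)
          rw [if_neg hnot, if_neg (show ¬(j < n ∧ c j) by tauto)]
      · rw [if_neg (by tauto), if_neg (by tauto)]

lemma outer_fold_length (W : Nat → List Int → List Int) (l : List Nat) (g : List (List Int)) :
    (l.foldl (fun g k => g.modify k (W k)) g).length = g.length := by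
  induction l generalizing g with
  | nil => rfl
  | cons a as ih => simp only [List.foldl_cons, ih, List.length_modify]

lemma outer_fold_getElem (W : Nat → List Int → List Int) (m : Nat) (g : List (List Int))
    (j : Nat) (hj : j < g.length) :
    ((List.range m).foldl (fun g k => g.modify k (W k)) g)[j]'(by
        rw [outer_fold_length]; exact hj)
      = if j < m then W j (g[j]) else g[j] := by
  induction m with
  | zero => simp
  | succ m ih =>
    simp only [List.range_succ, List.foldl_append, List.foldl_cons, List.foldl_nil]
    rw [List.getElem_modify, ih]
    by_cases hjm : m = j
    · subst hjm
      rw [if_pos rfl, if_neg (lt_irrefl m), if_pos (Nat.lt_succ_self m)]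
    · rw [if_neg hjm]
      by_cases hlt : j < m
      · rw [if_pos hlt, if_pos (Nat.lt_succ_of_lt hlt)]
      · rw [if_neg hlt, if_neg (by omega)]

-- A, characterised cellwise
lemma make_dense_diamond_eq (cols rows : Int) :
    make_dense_diamond cols rows
      = (List.range rows.toNat).map (fun (y : Nat) =>
          (List.range cols.toNat).map (fun (x : Nat) =>
            if pvCond ((y : Nat) : Int) ((x : Nat) : Int) then (1 : Int) else 0)) := by
  unfold make_dense_diamond
  rw [PySem.List.pyRange_one 0 rows, PySem.List.pyRange_one 0 cols]
  simp only [zero_add, Int.sub_zero, List.foldl_map, List.map_map, Int.toNat_natCast,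
    Function.comp_def]
  have hstep : ∀ (g : List (List Int)) (k : Nat),
      (List.range cols.toNat).foldl (fun g (j : Nat) =>
        if PySem.Int.mod ((j : Int) + (k : Int)) 4 = 0 ∨
           PySem.Int.mod ((j : Int) - (k : Int)) 4 = 0 then
          g.modify k (fun row => row.set j 1)
        else g) g
      = g.modify k (fun r => (List.range cols.toNat).foldl
          (fun r (j : Nat) => if pvCond (k : Int) (j : Int) then r.set j 1 else r) r) := by
    intro g k
    exact foldl_modify_factor (List.range cols.toNat)
      (fun (j : Nat) => pvCond (k : Int) (j : Int)) k (fun j row => row.set j 1) g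
  rw [show (fun (x : List (List Int)) (y : Nat) =>
      (List.range cols.toNat).foldl (fun x (j : Nat) =>
        if PySem.Int.mod ((j : Int) + (y : Int)) 4 = 0 ∨
           PySem.Int.mod ((j : Int) - (y : Int)) 4 = 0 then
          x.modify y (fun row => row.set j 1)
        else x) x)
      = fun (g : List (List Int)) (k : Nat) =>
          g.modify k (fun r => (List.range cols.toNat).foldl
            (fun r (j : Nat) => if pvCond (k : Int) (j : Int) then r.set j 1 else r) r)
    from funext fun g => funext fun k => hstep g k]
  apply List.ext_getElem
  · rw [outer_fold_length]; simp
  intro yk h1 h2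
  have hyk : yk < rows.toNat := by
    have := h2; rwa [List.length_map, List.length_range] at this
  rw [outer_fold_getElem _ rows.toNat _ yk (by simp [hyk]), if_pos hyk]
  have hget : ((List.range rows.toNat).map
      (fun (_ : Nat) => List.replicate cols.toNat (0 : Int)))[yk]'(by simp [hyk])
      = List.replicate cols.toNat (0 : Int) := by
    simp
  rw [hget, List.getElem_map, List.getElem_range]
  apply List.ext_getElem
  · rw [set_fold_length]; simp
  intro xj g1 g2
  have hxj : xj < cols.toNat := by
    have := g2; rwa [List.length_map, List.length_range] at this
  rw [set_fold_getElem _ cols.toNat _ xj (by simpa using hxj),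
      List.getElem_map, List.getElem_range]
  by_cases hc : pvCond (yk : Int) (xj : Int)
  · rw [if_pos ⟨hxj, hc⟩, if_pos hc]
  · rw [if_neg (by tauto), if_neg hc, List.getElem_replicate]

-- B, characterised cellwise (same shape)
lemma make_dense_diamond_alt_eq (cols rows : Int) :
    make_dense_diamond_alt cols rows
      = (List.range rows.toNat).map (fun (y : Nat) =>
          (List.range cols.toNat).map (fun (x : Nat) =>
            if pvCond ((y : Nat) : Int) ((x : Nat) : Int) then (1 : Int) else 0)) := by
  unfold make_dense_diamond_alt
  rw [PySem.List.pyRange_one 0 rows]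
  simp only [zero_add, Int.sub_zero, List.map_map, Function.comp_def]
  apply List.map_congr_left
  intro y hy
  have hyr : (y : Int) < rows := by
    have := List.mem_range.mp hy
    omega
  have h0 : 0 ≤ PySem.Int.mod ((y : Nat) : Int) 4 := PySem.Int.mod_nonneg _ (by norm_num)
  have h4 : PySem.Int.mod ((y : Nat) : Int) 4 < 4 := PySem.Int.mod_lt _ (by norm_num)
  have hle : PySem.Int.mod ((y : Nat) : Int) 4 ≤ (y : Int) := by
    rw [PySem.Int.mod_eq_emod_of_pos (by norm_num)]
    omega
  rw [PySem.List.pyGetD_map_pyRange_of_nonneg _ (min rows 4) _ [] h0 (by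
        exact lt_min (lt_of_le_of_lt hle hyr) h4),
      PySem.List.pyRange_one 0 cols]
  simp only [zero_add, Int.sub_zero, List.map_map, Function.comp_def]
  apply List.map_congr_left
  intro x _
  have hmv := pvCond_mod ((y : Nat) : Int) ((x : Nat) : Int)
  unfold pvCond at hmv
  by_cases hc : PySem.Int.mod (((x : Nat) : Int) + ((y : Nat) : Int)) 4 = 0 ∨
      PySem.Int.mod (((x : Nat) : Int) - ((y : Nat) : Int)) 4 = 0
  · rw [if_pos (hmv.mpr hc)]; unfold pvCond; rw [if_pos hc]
  · rw [if_neg (fun h => hc (hmv.mp h))]; unfold pvCond; rw [if_neg hc]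

-- ===== VERDICT (by name: the statement is the Claim_ definition above) =====
theorem make_dense_diamond_spec : Claim_equal_make_dense_diamond := by
  intro cols rows _
  unfold Spec_make_dense_diamond
  rw [make_dense_diamond_eq, make_dense_diamond_alt_eq]
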